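-- pv_equiv track=rewrite | github.com/TomBraggg/static-site-generator | src/htmlnode_utility.py | trim_block
-- ===== SOURCE A (Python) =====
-- def trim_block(block: str, blocktype: str) -> str:
--     match blocktype:
--         case "p":
--             return block
--         case "h1":
--             return block[2:]
--         case "h2":
--             return block[3:]
--         case "h3":
--             return block[4:]
--         case "h4":
--             return block[5:]
--         case "h5":
--             return block[6:]
--         case "h6":
--             return block[7:]
--         case "code":
--             return block[4:-3]
--         case "blockquote":
--             return block[1:]
--         case "ul":
--             trimmed_lines = []
--             for line in block.split("\n"):
--                 trimmed_line = line[2:]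
--                 trimmed_lines.append(trimmed_line)
--             return "\n".join(trimmed_lines)
--         case "ol":
--             trimmed_lines = []
--             for line in block.split("\n"):
--                 trimmed_line = line[3:]
--                 trimmed_lines.append(trimmed_line)
--             return "\n".join(trimmed_lines)
--         case _:
--             raise ValueError("BlockType not found")
-- ===== SOURCE B (Python) =====
-- SPECS = {
--     "p": (0, 0, 0),
--     "h1": (2, 0, 0),
--     "h2": (3, 0, 0),
--     "h3": (4, 0, 0),
--     "h4": (5, 0, 0),
--     "h5": (6, 0, 0),
--     "h6": (7, 0, 0),
--     "code": (4, 3, 0),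
--     "blockquote": (1, 0, 0),
--     "ul": (0, 0, 2),
--     "ol": (0, 0, 3),
-- }
--
--
-- def trim_block(block: str, blocktype: str) -> str:
--     # Uniform single-pass character scan: every block type is "drop `front` chars at
--     # the start, `back` at the end, and the first `per` chars of every line".
--     if blocktype not in SPECS:
--         raise ValueError("BlockType not found")
--     front, back, per = SPECS[blocktype]
--     stop = max(len(block) - back, 0)
--     out = []
--     col = 0
--     for i, c in enumerate(block[:stop]):
--         if i >= front and (c == "\n" or col >= per):
--             out.append(c)
--         col = 0 if c == "\n" else col + 1
--     return "".join(out)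
-- ===== Notes on version B (the rewrite author's own statement) =====
-- stated objective: alternative
-- what changed: A's eleven per-type branches of slicing and split/join loops are replaced by one uniform single-pass character scan driven by a (front, back, per-line) spec table: each character is kept or dropped by its global index and its column in the current line, so the ul/ol split('\n')/join passes and all slice branches disappear; unknown blocktypes still raise ValueError('BlockType not found') and lie outside Pre_.
import Mathlib
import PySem

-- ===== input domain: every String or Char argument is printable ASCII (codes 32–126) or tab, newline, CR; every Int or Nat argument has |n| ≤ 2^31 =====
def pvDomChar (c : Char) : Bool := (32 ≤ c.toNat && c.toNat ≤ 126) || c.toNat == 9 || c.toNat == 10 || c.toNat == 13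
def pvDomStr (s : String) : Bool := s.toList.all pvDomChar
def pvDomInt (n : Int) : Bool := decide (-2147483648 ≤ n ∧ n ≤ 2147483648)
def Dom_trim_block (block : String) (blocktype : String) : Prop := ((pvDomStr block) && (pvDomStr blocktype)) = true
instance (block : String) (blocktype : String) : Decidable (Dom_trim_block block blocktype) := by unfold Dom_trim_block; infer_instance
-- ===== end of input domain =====

-- B replaces A's eleven per-type slice/split branches by one uniform single-pass character
-- scan driven by a (front, back, per-line) spec table (objective: alternative).

-- ===== PORT A =====
-- literal transliteration of A's match statement; the default case raises ValueError → excluded by Pre_, "" here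
def trim_block (block : String) (blocktype : String) : String :=
  if blocktype == "p" then block
  else if blocktype == "h1" then PySem.Str.slice block (some 2) none
  else if blocktype == "h2" then PySem.Str.slice block (some 3) none
  else if blocktype == "h3" then PySem.Str.slice block (some 4) none
  else if blocktype == "h4" then PySem.Str.slice block (some 5) none
  else if blocktype == "h5" then PySem.Str.slice block (some 6) none
  else if blocktype == "h6" then PySem.Str.slice block (some 7) none
  else if blocktype == "code" then PySem.Str.slice block (some 4) (some (-3))
  else if blocktype == "blockquote" then PySem.Str.slice block (some 1) none
  else if blocktype == "ul" then
    PySem.Str.join "\n"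
      ((((PySem.Str.split? block "\n").getD [])).foldl
        (fun acc line => acc ++ [PySem.Str.slice line (some 2) none]) [])
  else if blocktype == "ol" then
    PySem.Str.join "\n"
      ((((PySem.Str.split? block "\n").getD [])).foldl
        (fun acc line => acc ++ [PySem.Str.slice line (some 3) none]) [])
  else ""  -- raise ValueError("BlockType not found") in Python A

-- ===== PORT B =====
-- the SPECS table of Source B: blocktype ↦ (front, back, per-line) trim amounts
def pvSpecs : PySem.Dict String (Int × Int × Int) :=
  PySem.Dict.mk
    [("p", (0, 0, 0)), ("h1", (2, 0, 0)), ("h2", (3, 0, 0)), ("h3", (4, 0, 0)),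
     ("h4", (5, 0, 0)), ("h5", (6, 0, 0)), ("h6", (7, 0, 0)), ("code", (4, 3, 0)),
     ("blockquote", (1, 0, 0)), ("ul", (0, 0, 2)), ("ol", (0, 0, 3))]

-- single pass over the characters of block[:stop]: keep c when its global index has passed
-- `front` and its column in the current line has passed `per`
def trim_block_alt (block : String) (blocktype : String) : String :=
  match pvSpecs.get? blocktype with
  | none => ""  -- raise ValueError("BlockType not found") in Python B
  | some (front, back, per) =>
    let stop : Int := max (PySem.Str.len block - back) 0
    let res :=
      (PySem.List.enumerate (PySem.Str.slice block none (some stop)).toList 0).foldl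
        (fun (st : List Char × Int) p =>
          (if front ≤ p.1 ∧ (p.2 = '\n' ∨ per ≤ st.2) then st.1 ++ [p.2] else st.1,
           if p.2 = '\n' then 0 else st.2 + 1))
        ([], 0)
    String.ofList res.1  -- "".join(out)

-- ===== PRECONDITION & SPEC =====
-- Pre_ excludes exactly the blocktypes on which A (and B) raises ValueError("BlockType not found")
def Pre_trim_block (block : String) (blocktype : String) : Prop :=
  blocktype ∈ ["p", "h1", "h2", "h3", "h4", "h5", "h6", "code", "blockquote", "ul", "ol"]
instance (block : String) (blocktype : String) : Decidable (Pre_trim_block block blocktype) := by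
  unfold Pre_trim_block; infer_instance
def pvWitness_trim_block : String × String := ("## hello", "h2")

def Spec_trim_block (block : String) (blocktype : String) (out : String) : Prop := out = trim_block_alt block blocktype
instance (block : String) (blocktype : String) (out : String) : Decidable (Spec_trim_block block blocktype out) := by unfold Spec_trim_block; infer_instance

-- ===== CLAIM (what is proved, stated in full; the proofs are below) =====
def Claim_equal_trim_block : Prop := ∀ (block : String) (blocktype : String), Dom_trim_block block blocktype → Pre_trim_block block blocktype → Spec_trim_block block blocktype (trim_block block blocktype)

-- ===== LEMMAS AND PROOFS =====

-- recursive specification of B's scan loop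
def pvScan (front per : Int) : List Char → Int → Int → List Char
  | [], _, _ => []
  | c :: t, j, col =>
    (if front ≤ j ∧ (c = '\n' ∨ per ≤ col) then [c] else []) ++
      pvScan front per t (j + 1) (if c = '\n' then 0 else col + 1)

lemma pv_fold_eq_scan (front per : Int) (cs : List Char) (j col : Int) (acc : List Char) :
    ((PySem.List.enumerate cs j).foldl
      (fun (st : List Char × Int) p =>
        (if front ≤ p.1 ∧ (p.2 = '\n' ∨ per ≤ st.2) then st.1 ++ [p.2] else st.1,
         if p.2 = '\n' then 0 else st.2 + 1))
      (acc, col)).1 = acc ++ pvScan front per cs j col := by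
  induction cs generalizing j col acc with
  | nil => simp [pvScan, PySem.List.enumerate]
  | cons c t ih =>
    rw [PySem.List.enumerate_cons]
    simp only [List.foldl_cons, pvScan]
    rw [ih]
    by_cases h : front ≤ j ∧ (c = '\n' ∨ per ≤ col) <;> simp [h]

-- per = 0: the column test is vacuous and the scan drops the first `front` characters
lemma pvScan_per_zero (front : Int) (cs : List Char) : ∀ j col : Int, 0 ≤ col →
    pvScan front 0 cs j col = cs.drop (front - j).toNat := by
  induction cs with
  | nil => intro j col _; simp [pvScan]
  | cons c t ih =>
    intro j col hcol
    have hcol' : (0 : Int) ≤ (if c = '\n' then 0 else col + 1) := by split <;> omega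
    simp only [pvScan]
    rw [ih (j + 1) _ hcol']
    by_cases h : front ≤ j
    · have hcond : front ≤ j ∧ (c = '\n' ∨ (0 : Int) ≤ col) := ⟨h, Or.inr hcol⟩
      have h1 : (front - j).toNat = 0 := by omega
      have h2 : (front - (j + 1)).toNat = 0 := by omega
      simp [hcond, h1, h2]
    · have hcond : ¬(front ≤ j ∧ (c = '\n' ∨ (0 : Int) ≤ col)) := fun hh => h hh.1
      have h1 : (front - j).toNat = (front - (j + 1)).toNat + 1 := by omega
      simp [hcond, h1]

-- every splitOn result is nonempty, in cons form
lemma pv_splitOn_exists (cs : List Char) : ∃ h t', List.splitOn '\n' cs = h :: t' := by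
  rcases hx : List.splitOn '\n' cs with _ | ⟨h, t'⟩
  · exact absurd hx (List.splitOnP_ne_nil _ _)
  · exact ⟨h, t', rfl⟩

-- join with an appended head segment
lemma pv_join_cons_append (x y : List Char) (rest : List (List Char)) :
    PySem.Chars.join ['\n'] ((x ++ y) :: rest) = x ++ PySem.Chars.join ['\n'] (y :: rest) := by
  cases rest with
  | nil => simp [PySem.Chars.join_singleton]
  | cons q r => simp [PySem.Chars.join_cons_cons]

-- the scan result written line-by-line: head line trimmed by per - col, later lines by per
def pvLines (per col : Int) : List (List Char) → List Char
  | [] => []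
  | h :: t => PySem.Chars.join ['\n'] (h.drop (per - col).toNat :: t.map (fun l => l.drop per.toNat))

lemma pvLines_zero_col (per : Int) (ls : List (List Char)) :
    pvLines per 0 ls = PySem.Chars.join ['\n'] (ls.map (fun l => l.drop per.toNat)) := by
  cases ls with
  | nil => simp [pvLines, PySem.Chars.join_nil]
  | cons h t => simp [pvLines]

lemma pvScan_lines (front per : Int) (cs : List Char) : ∀ j col : Int, front ≤ j →
    pvScan front per cs j col = pvLines per col (List.splitOn '\n' cs) := by
  induction cs with
  | nil =>
    intro j col _
    simp [pvScan, List.splitOn_nil, pvLines, PySem.Chars.join_singleton]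
  | cons c t ih =>
    intro j col hj
    have hj1 : front ≤ j + 1 := by omega
    obtain ⟨h, t', hsplit⟩ := pv_splitOn_exists t
    by_cases hc : c = '\n'
    · subst hc
      have hcons : List.splitOn '\n' ('\n' :: t) = [] :: List.splitOn '\n' t := by
        simp [List.splitOn, List.splitOnP_cons]
      have hstep : pvScan front per ('\n' :: t) j col = '\n' :: pvScan front per t (j + 1) 0 := by
        simp [pvScan, hj]
      rw [hcons, hsplit, hstep, ih (j + 1) 0 hj1, hsplit]
      simp [pvLines, PySem.Chars.join_cons_cons]
    · have hcons : List.splitOn '\n' (c :: t) = (List.splitOn '\n' t).modifyHead (List.cons c) := by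
        simp [List.splitOn, List.splitOnP_cons, hc]
      have hdrop : (c :: h).drop (per - col).toNat =
          (if per ≤ col then [c] else []) ++ h.drop (per - (col + 1)).toNat := by
        by_cases hpc : per ≤ col
        · have h1 : (per - col).toNat = 0 := by omega
          have h2 : (per - (col + 1)).toNat = 0 := by omega
          simp [hpc, h1, h2]
        · have h1 : (per - col).toNat = (per - (col + 1)).toNat + 1 := by omega
          simp [hpc, h1, List.drop_succ_cons]
      have hstep : pvScan front per (c :: t) j col =
          (if per ≤ col then [c] else []) ++ pvScan front per t (j + 1) (col + 1) := by
        by_cases hpc : per ≤ col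
        · simp [pvScan, hc, hj, hpc]
        · simp [pvScan, hc, hpc]
      rw [hcons, hsplit, List.modifyHead, hstep, ih (j + 1) (col + 1) hj1, hsplit]
      show _ = pvLines per col ((c :: h) :: t')
      simp only [pvLines]
      rw [hdrop, pv_join_cons_append]

-- PySem's Python split on a single-character separator is Mathlib's List.splitOn
lemma pv_splitOn_go_newline (fuel : Nat) : ∀ (l cur : List Char) (acc : List (List Char)),
    l.length < fuel →
    PySem.Chars.splitOn.go ['\n'] fuel l cur acc =
      acc.reverse ++ (List.splitOn '\n' l).modifyHead (fun h => cur.reverse ++ h) := by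
  induction fuel with
  | zero => intro l cur acc h; omega
  | succ f ih =>
    intro l cur acc hlen
    cases l with
    | nil =>
      simp [PySem.Chars.splitOn.go, List.splitOn_nil]
    | cons c rest =>
      by_cases hc : c = '\n'
      · subst hc
        have hpre : List.isPrefixOf ['\n'] ('\n' :: rest) = true := by
          simp [List.isPrefixOf]
        rw [show PySem.Chars.splitOn.go ['\n'] (f + 1) ('\n' :: rest) cur acc =
            PySem.Chars.splitOn.go ['\n'] f rest [] (cur.reverse :: acc) by
          simp [PySem.Chars.splitOn.go, hpre]]
        rw [ih rest [] (cur.reverse :: acc) (by simp at hlen ⊢; omega)]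
        have : List.splitOn '\n' ('\n' :: rest) = [] :: List.splitOn '\n' rest := by
          simp [List.splitOn, List.splitOnP_cons]
        rw [this]
        obtain ⟨h, t', hsplit⟩ := pv_splitOn_exists rest
        simp [hsplit]
      · have hpre : List.isPrefixOf ['\n'] (c :: rest) = false := by
          simp [List.isPrefixOf]; exact fun h => absurd h.symm hc
        rw [show PySem.Chars.splitOn.go ['\n'] (f + 1) (c :: rest) cur acc =
            PySem.Chars.splitOn.go ['\n'] f rest (c :: cur) acc by
          simp [PySem.Chars.splitOn.go, hpre]]
        rw [ih rest (c :: cur) acc (by simp at hlen ⊢; omega)]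
        have : List.splitOn '\n' (c :: rest) = (List.splitOn '\n' rest).modifyHead (List.cons c) := by
          simp [List.splitOn, List.splitOnP_cons, hc]
        rw [this, List.modifyHead_modifyHead]
        obtain ⟨h, t', hsplit⟩ := pv_splitOn_exists rest
        simp [hsplit]

lemma pv_splitOn_newline (cs : List Char) :
    PySem.Chars.splitOn cs ['\n'] = List.splitOn '\n' cs := by
  have := pv_splitOn_go_newline (cs.length + 1) cs [] [] (by omega)
  rw [PySem.Chars.splitOn, this]
  obtain ⟨h, t', hsplit⟩ := pv_splitOn_exists cs
  simp [hsplit]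

-- B's branch for a known spec-table entry, reduced to the recursive scan
lemma pv_alt_eq (block bt : String) (front back per : Int) (hb : 0 ≤ back)
    (hspec : pvSpecs.get? bt = some (front, back, per)) :
    trim_block_alt block bt =
      String.ofList (pvScan front per (block.toList.take (block.toList.length - back.toNat)) 0 0) := by
  unfold trim_block_alt
  rw [hspec]
  have htake : (PySem.Str.slice block none (some (max (PySem.Str.len block - back) 0))).toList =
      block.toList.take (block.toList.length - back.toNat) := by
    rw [PySem.Str.toList_slice, PySem.Chars.slice_eq_listSlice, PySem.List.slice_to _ (le_max_right _ _)]
    congr 1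
    simp [PySem.Str.len]
    omega
  simp only [htake, pv_fold_eq_scan, List.nil_append]

-- back = 0 takes the whole string
lemma pv_take_all (block : String) :
    block.toList.take (block.toList.length - (0 : Int).toNat) = block.toList := by
  simp

-- B on a (front, 0, 0) entry is exactly Python's block[front:]
lemma pv_case_front (block bt : String) (k : Int) (hk : 0 ≤ k)
    (hspec : pvSpecs.get? bt = some (k, 0, 0)) :
    trim_block_alt block bt = PySem.Str.slice block (some k) none := by
  rw [pv_alt_eq block bt k 0 0 le_rfl hspec, pv_take_all, pvScan_per_zero k _ 0 0 le_rfl]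
  conv_rhs => rw [← String.ofList_toList (s := PySem.Str.slice block (some k) none)]
  congr 1
  rw [PySem.Str.toList_slice, PySem.Chars.slice_eq_listSlice, PySem.List.slice_from _ hk]
  simp

-- Python's xs[4:-3] as a take/drop
lemma pv_slice_code (xs : List Char) :
    PySem.List.slice xs (some 4) (some (-3)) = (xs.take (xs.length - 3)).drop 4 := by
  simp only [PySem.List.slice, PySem.List.clampIdx,
    show ((4 : Int).toNat) = 4 from rfl]
  norm_num
  rw [List.drop_take]
  by_cases hlen : 4 ≤ xs.length
  · have h1 : min 4 xs.length = 4 := by omega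
    have h2 : (if xs.length < 3 then 0 else ((xs.length : Int) + -3).toNat) = xs.length - 3 := by
      split <;> omega
    rw [h1, h2]
  · have h4 : List.drop 4 xs = [] := List.drop_eq_nil_of_le (by omega)
    have hm : min 4 xs.length = xs.length := by omega
    rw [h4, hm, List.drop_length]
    simp

-- B on the "code" entry is exactly Python's block[4:-3]
lemma pv_case_code (block : String) :
    trim_block_alt block "code" = PySem.Str.slice block (some 4) (some (-3)) := by
  rw [pv_alt_eq block "code" 4 3 0 (by omega) rfl, pvScan_per_zero 4 _ 0 0 le_rfl]
  conv_rhs => rw [← String.ofList_toList (s := PySem.Str.slice block (some 4) (some (-3)))]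
  congr 1
  rw [PySem.Str.toList_slice, PySem.Chars.slice_eq_listSlice, pv_slice_code]
  simp only [show ((3 : Int).toNat) = 3 from rfl, show ((4 : Int) - 0).toNat = 4 from rfl]

-- B on a (0, 0, per) entry is exactly Python's per-line trim loop
lemma pv_case_lines (block bt : String) (n : Int) (hn : 0 ≤ n)
    (hspec : pvSpecs.get? bt = some (0, 0, n)) :
    trim_block_alt block bt =
      PySem.Str.join "\n"
        ((((PySem.Str.split? block "\n").getD [])).foldl
          (fun acc line => acc ++ [PySem.Str.slice line (some n) none]) []) := by
  rw [pv_alt_eq block bt 0 0 n le_rfl hspec, pv_take_all,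
    pvScan_lines 0 n block.toList 0 0 le_rfl, pvLines_zero_col,
    PySem.List.foldl_append_singleton_eq_map, List.nil_append]
  obtain ⟨ls, hls, hmap⟩ : ∃ ls, PySem.Str.split? block "\n" = some ls ∧
      ls.map String.toList = List.splitOn '\n' block.toList := by
    have hsp := PySem.Str.split?_map block "\n"
    have hch : PySem.Chars.split? block.toList "\n".toList =
        some (List.splitOn '\n' block.toList) := by
      rw [show ("\n".toList : List Char) = ['\n'] from rfl, PySem.Chars.split?,
        ← pv_splitOn_newline]
      simp
    rw [hch] at hsp
    rcases hx : PySem.Str.split? block "\n" with _ | ls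
    · rw [hx] at hsp; simp at hsp
    · rw [hx] at hsp
      simp only [Option.map_some, Option.some_inj] at hsp
      exact ⟨ls, rfl, hsp⟩
  rw [hls]
  conv_rhs => rw [← String.ofList_toList (s := PySem.Str.join _ _)]
  congr 1
  rw [PySem.Str.toList_join, ← hmap]
  congr 1
  simp only [Option.getD_some, List.map_map]
  apply List.map_congr_left
  intro l _
  simp [PySem.Str.toList_slice, PySem.Chars.slice_eq_listSlice, PySem.List.slice_from _ hn]

-- Python's block[0:] is block
lemma pv_slice_zero (block : String) : PySem.Str.slice block (some 0) none = block := by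
  rw [← String.ofList_toList (s := PySem.Str.slice block (some 0) none)]
  conv_rhs => rw [← String.ofList_toList (s := block)]
  congr 1
  rw [PySem.Str.toList_slice, PySem.Chars.slice_eq_listSlice]
  simp [PySem.List.slice_zero_start, PySem.List.slice_none_none]

-- ===== VERDICT (by name: the statement is the Claim_ definition above) =====
theorem trim_block_spec : Claim_equal_trim_block := by
  intro block blocktype _ hpre
  unfold Spec_trim_block
  simp only [Pre_trim_block, List.mem_cons, List.not_mem_nil, or_false] at hpre
  rcases hpre with h|h|h|h|h|h|h|h|h|h|h <;> subst h
  · rw [pv_case_front block "p" 0 le_rfl rfl, pv_slice_zero]; simp [trim_block]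
  · rw [pv_case_front block "h1" 2 (by omega) rfl]; simp [trim_block]
  · rw [pv_case_front block "h2" 3 (by omega) rfl]; simp [trim_block]
  · rw [pv_case_front block "h3" 4 (by omega) rfl]; simp [trim_block]
  · rw [pv_case_front block "h4" 5 (by omega) rfl]; simp [trim_block]
  · rw [pv_case_front block "h5" 6 (by omega) rfl]; simp [trim_block]
  · rw [pv_case_front block "h6" 7 (by omega) rfl]; simp [trim_block]
  · rw [pv_case_code block]; simp [trim_block]
  · rw [pv_case_front block "blockquote" 1 (by omega) rfl]; simp [trim_block]
  · rw [pv_case_lines block "ul" 2 (by omega) rfl]; simp [trim_block]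
  · rw [pv_case_lines block "ol" 3 (by omega) rfl]; simp [trim_block]
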